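-- pv_equiv track=rewrite | github.com/KacperBabiak/DramaRecomender | Untitled-1.py | count_dice
-- ===== SOURCE A (Python) =====
-- def count_dice(throw):
--     dic = {}
--
--
--     for thr in str(throw):
--         if thr in dic:
--             dic.update({thr : (dic[thr] +1) })
--         else:
--             dic.update({thr : 1 })
--
--     dic = dict(sorted(dic.items()))
--
--
--
--
--     return dic
-- ===== SOURCE B (Python) =====
-- def count_dice(throw):
--     s = sorted(str(throw))
--     out = {}
--     i = 0
--     while i < len(s):
--         j = i
--         while j < len(s) and s[j] == s[i]:
--             j += 1
--         out[s[i]] = j - i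
--         i = j
--     return out
-- ===== Notes on version B (the rewrite author's own statement) =====
-- stated objective: alternative
-- what changed: B sorts the characters of str(throw) first and counts each maximal run of equal characters in one grouping pass over the sorted list, instead of hash-counting into a dict during the walk and sorting the items afterwards.
import Mathlib
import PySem

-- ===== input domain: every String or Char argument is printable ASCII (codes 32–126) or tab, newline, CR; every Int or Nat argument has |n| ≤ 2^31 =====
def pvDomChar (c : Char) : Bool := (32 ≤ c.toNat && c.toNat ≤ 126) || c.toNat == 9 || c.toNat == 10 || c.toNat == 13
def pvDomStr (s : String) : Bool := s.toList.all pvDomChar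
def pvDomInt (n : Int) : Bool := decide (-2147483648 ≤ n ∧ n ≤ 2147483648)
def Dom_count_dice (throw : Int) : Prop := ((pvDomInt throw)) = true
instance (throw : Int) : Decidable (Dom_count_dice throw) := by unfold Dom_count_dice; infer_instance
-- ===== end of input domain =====

-- B sorts the characters of str(throw) first and counts each maximal run in one grouping
-- pass, instead of hash-counting into a dict during the walk and sorting the items after.

-- ===== PORT A =====
def count_dice (throw : Int) : List (String × Int) :=
  -- dic = {}; for thr in str(throw): if thr in dic: dic.update({thr: dic[thr]+1}) else dic.update({thr: 1})
  -- (dic[thr] is only read when 'thr in dic' holds, so getD is exact there)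
  let dic : PySem.Dict String Int :=
    (PySem.Int.toChars throw).foldl
      (fun d thr =>
        if d.contains (String.ofList [thr]) then
          d.insert (String.ofList [thr]) (d.getD (String.ofList [thr]) 0 + 1)
        else
          d.insert (String.ofList [thr]) 1)
      PySem.Dict.empty
  -- dic = dict(sorted(dic.items())); return dic   (tuples compare lexicographically: sorted2)
  (PySem.Dict.ofList (PySem.List.sorted2 dic.items (fun p => p.1) (fun p => p.2))).items

-- ===== PORT B =====
-- the inner 'while j < len(s) and s[j] == s[i]' run-scan and the outer while over runs
def pvRuns : List Char → List (String × Int)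
  | [] => []
  | c :: rest =>
    (String.ofList [c], (1 + (rest.takeWhile (fun x => x == c)).length : Int)) ::
      pvRuns (rest.dropWhile (fun x => x == c))
termination_by cs => cs.length
decreasing_by
  simpa [Nat.lt_succ_iff] using List.length_dropWhile_le (fun x => x == c) rest

def count_dice_alt (throw : Int) : List (String × Int) :=
  pvRuns (PySem.List.sorted (PySem.Int.toChars throw) (fun c => c))

-- ===== PRECONDITION & SPEC =====
def Spec_count_dice (throw : Int) (out : List (String × Int)) : Prop := out = count_dice_alt throw
instance (throw : Int) (out : List (String × Int)) : Decidable (Spec_count_dice throw out) := by unfold Spec_count_dice; infer_instance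

-- ===== CLAIM (what is proved, stated in full; the proofs are below) =====
def Claim_equal_count_dice : Prop := ∀ (throw : Int), Dom_count_dice throw → Spec_count_dice throw (count_dice throw)

-- ===== LEMMAS AND PROOFS =====

theorem pvSingle_lt (a b : Char) (h : a < b) : String.ofList [a] < String.ofList [b] := by
  rw [String.lt_iff_toList_lt]
  simp only [String.toList_ofList]
  exact List.Lex.rel h

theorem pvSingle_inj : Function.Injective (fun c : Char => String.ofList [c]) := by
  intro a b h
  simpa using (String.ofList_inj.mp h)

theorem pvInsertBy_cons {α : Type} (f : α → α → Bool) (x y : α) (ys : List α) :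
    PySem.List.insertBy f x (y :: ys) =
      if f x y then x :: y :: ys else y :: PySem.List.insertBy f x ys := rfl

theorem pvInsertBy_congr {α : Type} (f g : α → α → Bool) (x : α) (ys : List α)
    (h : ∀ b ∈ ys, f x b = g x b) :
    PySem.List.insertBy f x ys = PySem.List.insertBy g x ys := by
  induction ys with
  | nil => rfl
  | cons y ys ih =>
    rw [pvInsertBy_cons, pvInsertBy_cons, h y (by simp)]
    rw [ih (fun b hb => h b (by simp [hb]))]

theorem pvFoldl_insertBy_congr {α : Type} (f g : α → α → Bool) (xs acc : List α)
    (h : ∀ a ∈ xs, ∀ b, (b ∈ xs ∨ b ∈ acc) → f a b = g a b) :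
    xs.foldl (fun acc x => PySem.List.insertBy f x acc) acc =
      xs.foldl (fun acc x => PySem.List.insertBy g x acc) acc := by
  induction xs generalizing acc with
  | nil => rfl
  | cons x xs ih =>
    simp only [List.foldl_cons]
    rw [pvInsertBy_congr f g x acc (fun b hb => h x (by simp) b (Or.inr hb))]
    exact ih _ (fun a ha b hb => by
      rcases hb with hb | hb
      · exact h a (by simp [ha]) b (Or.inl (by simp [hb]))
      · rcases (PySem.List.mem_insertBy _ _ _ _).mp hb with hb | hb
        · exact h a (by simp [ha]) b (Or.inl (by simp [hb]))
        · exact h a (by simp [ha]) b (Or.inr hb))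

-- sorted with a tuple key (k1, k2) is sorted by k1 alone when k2 is determined by k1
theorem pvSorted2_eq_sorted {α : Type} (xs : List (α)) (k1 : α → String) (k2 : α → Int)
    (h : ∀ a ∈ xs, ∀ b ∈ xs, k1 a = k1 b → k2 a = k2 b) :
    PySem.List.sorted2 xs k1 k2 = PySem.List.sorted xs k1 := by
  simp only [PySem.List.sorted2, PySem.List.sorted, if_neg (by simp : ¬(false = true))]
  apply pvFoldl_insertBy_congr
  intro a ha b hb
  rcases hb with hb | hb
  · rcases lt_trichotomy (k1 a) (k1 b) with hlt | heq | hgt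
    · simp [hlt]
    · have h2 : k2 a = k2 b := h a ha b hb heq
      simp [heq, h2]
    · simp [hgt, not_lt.mpr (le_of_lt hgt)]
  · simp at hb

-- ---- Set helpers ----

theorem pvDiscard_not_mem {α : Type} [BEq α] [LawfulBEq α] (s : PySem.Set α) (c : α)
    (h : c ∉ s) : s.discard c = s := by
  simp only [PySem.Set.discard]
  rw [List.filter_eq_self]
  intro a ha
  simp only [Bool.not_eq_eq_eq_not, Bool.not_true, beq_eq_false_iff_ne, ne_eq]
  rintro rfl; exact h ha

theorem pvDiscard_discard {α : Type} [BEq α] (s : PySem.Set α) (c : α) :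
    (s.discard c).discard c = s.discard c := by
  simp [PySem.Set.discard, List.filter_filter]

theorem pvDiscard_cons_self {α : Type} [BEq α] [LawfulBEq α] (s : List α) (c : α) :
    PySem.Set.discard (c :: s) c = PySem.Set.discard s c := by
  simp [PySem.Set.discard]

theorem pvOfList_map {α β : Type} [BEq α] [LawfulBEq α] [BEq β] [LawfulBEq β]
    (f : α → β) (hf : Function.Injective f) (xs : List α) :
    PySem.Set.ofList (xs.map f) = (PySem.Set.ofList xs).map f := by
  induction xs with
  | nil => rfl
  | cons x xs ih =>
    rw [List.map_cons, PySem.Set.ofList_cons, PySem.Set.ofList_cons, ih, List.map_cons]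
    congr 1
    simp only [PySem.Set.discard, List.filter_map]
    congr 1
    apply List.filter_congr
    intro a _
    simp [Function.comp, hf.eq_iff]

theorem pvOfList_sublist {α : Type} [BEq α] [LawfulBEq α] (xs : List α) :
    (PySem.Set.ofList xs).Sublist xs := by
  induction xs with
  | nil => simp [PySem.Set.ofList]
  | cons x xs ih =>
    rw [PySem.Set.ofList_cons]
    exact List.Sublist.cons₂ x (List.Sublist.trans (List.filter_sublist) ih)

theorem pvDiscard_ofList_append (tw dw : List Char) (c : Char)
    (htw : ∀ x ∈ tw, x = c) (hdw : c ∉ dw) :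
    (PySem.Set.ofList (tw ++ dw)).discard c = PySem.Set.ofList dw := by
  induction tw with
  | nil =>
    simp only [List.nil_append]
    exact pvDiscard_not_mem _ c (fun hc => hdw ((PySem.Set.mem_ofList dw c).mp hc))
  | cons x tw ih =>
    have hx : x = c := htw x (by simp)
    subst hx
    rw [List.cons_append, PySem.Set.ofList_cons, pvDiscard_cons_self, pvDiscard_discard]
    exact ih (fun y hy => htw y (by simp [hy]))

-- ---- characterisation of B's run-grouping pass on a ≤-sorted char list ----

theorem pvRuns_eq (cs : List Char) (h : cs.Pairwise (· ≤ ·)) :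
    pvRuns cs =
      (PySem.Set.ofList cs).map (fun c => (String.ofList [c], (cs.count c : Int))) := by
  induction cs using pvRuns.induct with
  | case1 => simp [pvRuns]
  | case2 c rest ih =>
    have hrest : rest.Pairwise (· ≤ ·) := (List.pairwise_cons.mp h).2
    have hhead : ∀ x ∈ rest, c ≤ x := (List.pairwise_cons.mp h).1
    have htw : ∀ x ∈ rest.takeWhile (fun x => x == c), x = c := by
      intro x hx
      simpa using List.mem_takeWhile_imp hx
    have hsplit : rest.takeWhile (fun x => x == c) ++ rest.dropWhile (fun x => x == c) = rest :=
      List.takeWhile_append_dropWhile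
    have hdw_pw : (rest.dropWhile (fun x => x == c)).Pairwise (· ≤ ·) :=
      hrest.sublist (List.dropWhile_sublist _)
    have hdw : c ∉ rest.dropWhile (fun x => x == c) := by
      intro hc
      cases hd : rest.dropWhile (fun x => x == c) with
      | nil => rw [hd] at hc; simp at hc
      | cons d dw' =>
        have hdne : ¬ (d == c) = true := by
          have := List.head_dropWhile_not (fun x => x == c) (l := rest) (by rw [hd]; simp)
          simpa [hd] using this
        have hdne' : d ≠ c := by simpa using hdne
        have hdmem : d ∈ rest := (List.dropWhile_sublist _).mem (by rw [hd]; simp)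
        have hcd : c < d := lt_of_le_of_ne (hhead d hdmem) (fun e => hdne' e.symm)
        rw [hd] at hc
        rcases List.mem_cons.mp hc with rfl | hc
        · exact absurd rfl hdne'
        · have : d ≤ c := (List.pairwise_cons.mp (hd ▸ hdw_pw)).1 c hc
          exact absurd (lt_of_lt_of_le hcd this) (lt_irrefl c)
    have hcount_tw : (rest.takeWhile (fun x => x == c)).count c =
        (rest.takeWhile (fun x => x == c)).length :=
      List.count_eq_length.mpr (fun b hb => (htw b hb).symm)
    have hcount_dw : (rest.dropWhile (fun x => x == c)).count c = 0 :=
      List.count_eq_zero.mpr hdw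
    have hcount_rest : ∀ c' : Char, rest.count c' =
        (rest.takeWhile (fun x => x == c)).count c' + (rest.dropWhile (fun x => x == c)).count c' := by
      intro c'
      conv_lhs => rw [← hsplit]
      exact List.count_append ..
    have hdisc : (PySem.Set.ofList rest).discard c =
        PySem.Set.ofList (rest.dropWhile (fun x => x == c)) := by
      rw [show PySem.Set.ofList rest =
            PySem.Set.ofList (rest.takeWhile (fun x => x == c) ++ rest.dropWhile (fun x => x == c))
          from by rw [hsplit]]
      exact pvDiscard_ofList_append _ _ c htw hdw
    rw [pvRuns, ih hdw_pw, PySem.Set.ofList_cons, List.map_cons, hdisc]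
    congr 1
    · have hc1 : (c :: rest).count c = 1 + (rest.takeWhile (fun x => x == c)).length := by
        rw [List.count_cons_self, hcount_rest c, hcount_tw, hcount_dw]
        omega
      rw [hc1]
      push_cast
      ring_nf
    · apply List.map_congr_left
      intro c' hc'
      have hc'dw : c' ∈ rest.dropWhile (fun x => x == c) :=
        (PySem.Set.mem_ofList _ _).mp hc'
      have hne : c' ≠ c := fun e => hdw (e ▸ hc'dw)
      have hcnt : (c :: rest).count c' = (rest.dropWhile (fun x => x == c)).count c' := by
        rw [List.count_cons_of_ne hne.symm, hcount_rest c']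
        have : (rest.takeWhile (fun x => x == c)).count c' = 0 :=
          List.count_eq_zero.mpr (fun hmem => hne (htw c' hmem))
        omega
      rw [hcnt]

-- ---- A's counting loop is Counter(map single s) ----

theorem pvDic_eq (s : List Char) :
    s.foldl
      (fun d thr =>
        if d.contains (String.ofList [thr]) then
          d.insert (String.ofList [thr]) (d.getD (String.ofList [thr]) 0 + 1)
        else
          d.insert (String.ofList [thr]) 1)
      PySem.Dict.empty
      = PySem.Dict.counter (s.map (fun c => String.ofList [c])) := by
  rw [← PySem.Dict.foldl_insert_getD_add_one_eq_counter, List.foldl_map]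
  congr 1
  funext d thr
  by_cases hc : d.contains (String.ofList [thr]) = true
  · simp [hc]
  · have h0 : d.getD (String.ofList [thr]) 0 = 0 := by
      have := (PySem.Dict.get?_eq_none_iff_contains d (String.ofList [thr])).mpr
        (by simpa using hc)
      simp [PySem.Dict.getD, this]
    simp [hc, h0]

-- ---- dict(ps) round-trips when the keys of ps are distinct ----

theorem pvUpdate_items {κ ν : Type} [BEq κ] [LawfulBEq κ] (ps : List (κ × ν))
    (d : PySem.Dict κ ν) (h1 : (ps.map Prod.fst).Nodup)
    (h2 : ∀ k ∈ ps.map Prod.fst, d.contains k = false) :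
    (d.update ps).items = d.items ++ ps := by
  induction ps generalizing d with
  | nil => simp [PySem.Dict.update]
  | cons p ps ih =>
    have hfresh : d.contains p.1 = false := h2 p.1 (by simp)
    have hins : (d.insert p.1 p.2).items = d.items ++ [p] := by
      simp [PySem.Dict.insert, hfresh]
    have hstep : (d.update (p :: ps)) = ((d.insert p.1 p.2).update ps) := by
      simp [PySem.Dict.update]
    rw [hstep, ih _ ((List.nodup_cons.mp (by simpa using h1)).2)]
    · rw [hins, List.append_assoc]; rfl
    · intro k hk
      have hkne : p.1 ≠ k := by
        intro e
        exact (List.nodup_cons.mp (by simpa using h1)).1 (e ▸ hk)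
      simp only [PySem.Dict.contains, hins, List.any_append]
      have : d.items.any (fun q => q.1 == k) = false := by
        simpa [PySem.Dict.contains] using h2 k (by simp [hk])
      simp [this, hkne]

theorem pvOfList_items {κ ν : Type} [BEq κ] [LawfulBEq κ] (ps : List (κ × ν))
    (h : (ps.map Prod.fst).Nodup) : (PySem.Dict.ofList ps).items = ps := by
  have := pvUpdate_items ps PySem.Dict.empty h (fun k _ => rfl)
  simpa [PySem.Dict.ofList, PySem.Dict.empty] using this

-- ===== VERDICT (by name: the statement is the Claim_ definition above) =====
theorem count_dice_spec : Claim_equal_count_dice := by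
  intro throw _
  show count_dice throw = count_dice_alt throw
  have hA : count_dice throw =
      (PySem.Dict.ofList (PySem.List.sorted2
        ((PySem.Set.ofList (PySem.Int.toChars throw)).map
          (fun c => (String.ofList [c], ((PySem.Int.toChars throw).count c : Int))))
        (fun p => p.1) (fun p => p.2))).items := by
    unfold count_dice
    rw [pvDic_eq]
    show (PySem.Dict.ofList (PySem.List.sorted2
        (PySem.Dict.counter ((PySem.Int.toChars throw).map (fun c => String.ofList [c]))).items
        (fun p => p.1) (fun p => p.2))).items = _
    rw [PySem.Dict.items_counter, pvOfList_map _ pvSingle_inj, List.map_map]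
    congr 2
    congr 1
    apply List.map_congr_left
    intro c _
    simp [Function.comp, List.count_map_of_injective _ _ pvSingle_inj]
  have hpwt : (PySem.List.sorted (PySem.Int.toChars throw) (fun c => c)).Pairwise (· ≤ ·) :=
    PySem.List.sorted_pairwise (PySem.Int.toChars throw) (fun c => c)
  have hB : count_dice_alt throw =
      (PySem.Set.ofList (PySem.List.sorted (PySem.Int.toChars throw) (fun c => c))).map
        (fun c => (String.ofList [c],
          ((PySem.List.sorted (PySem.Int.toChars throw) (fun c => c)).count c : Int))) := by
    unfold count_dice_alt
    exact pvRuns_eq _ hpwt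
  have hct : ∀ c, (PySem.List.sorted (PySem.Int.toChars throw) (fun c => c)).count c =
      (PySem.Int.toChars throw).count c :=
    fun c => (PySem.List.sorted_perm (PySem.Int.toChars throw) (fun c => c) false).count_eq c
  have hBs : count_dice_alt throw =
      (PySem.Set.ofList (PySem.List.sorted (PySem.Int.toChars throw) (fun c => c))).map
        (fun c => (String.ofList [c], ((PySem.Int.toChars throw).count c : Int))) := by
    rw [hB]
    exact List.map_congr_left (fun c _ => by rw [hct c])
  have hperm : (PySem.Set.ofList (PySem.List.sorted (PySem.Int.toChars throw) (fun c => c))).Perm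
      (PySem.Set.ofList (PySem.Int.toChars throw)) := by
    rw [List.perm_ext_iff_of_nodup (PySem.Set.nodup_ofList _) (PySem.Set.nodup_ofList _)]
    intro a
    rw [PySem.Set.mem_ofList, PySem.Set.mem_ofList, PySem.List.mem_sorted]
  have hpermP :
      ((PySem.Set.ofList (PySem.List.sorted (PySem.Int.toChars throw) (fun c => c))).map
        (fun c => (String.ofList [c], ((PySem.Int.toChars throw).count c : Int)))).Perm
      ((PySem.Set.ofList (PySem.Int.toChars throw)).map
        (fun c => (String.ofList [c], ((PySem.Int.toChars throw).count c : Int)))) :=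
    hperm.map _
  have hlt : (PySem.Set.ofList (PySem.List.sorted (PySem.Int.toChars throw) (fun c => c))).Pairwise
      (· < ·) := by
    have h1 := hpwt.sublist (pvOfList_sublist _)
    have h2 : (PySem.Set.ofList (PySem.List.sorted (PySem.Int.toChars throw) (fun c => c))).Pairwise
        (· ≠ ·) := PySem.Set.nodup_ofList _
    exact (h1.and h2).imp (fun h => lt_of_le_of_ne h.1 h.2)
  have hkeys :
      ((PySem.Set.ofList (PySem.List.sorted (PySem.Int.toChars throw) (fun c => c))).map
        (fun c => (String.ofList [c], ((PySem.Int.toChars throw).count c : Int)))).Pairwise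
      (fun a b => a.1 < b.1) := by
    rw [List.pairwise_map]
    exact hlt.imp (fun h => pvSingle_lt _ _ h)
  have hsorted : PySem.List.sorted
      ((PySem.Set.ofList (PySem.Int.toChars throw)).map
        (fun c => (String.ofList [c], ((PySem.Int.toChars throw).count c : Int))))
      (fun p => p.1) =
      (PySem.Set.ofList (PySem.List.sorted (PySem.Int.toChars throw) (fun c => c))).map
        (fun c => (String.ofList [c], ((PySem.Int.toChars throw).count c : Int))) :=
    PySem.List.sorted_eq_of_perm_of_pairwise_lt _ _ _ hpermP hkeys
  have hdet : ∀ a ∈ (PySem.Set.ofList (PySem.Int.toChars throw)).map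
        (fun c => (String.ofList [c], ((PySem.Int.toChars throw).count c : Int))),
      ∀ b ∈ (PySem.Set.ofList (PySem.Int.toChars throw)).map
        (fun c => (String.ofList [c], ((PySem.Int.toChars throw).count c : Int))),
      (fun p => p.1) a = (fun p => p.1) b → (fun p => p.2) a = (fun p => p.2) b := by
    intro a ha b hb hab
    obtain ⟨ca, _, rfl⟩ := List.mem_map.mp ha
    obtain ⟨cb, _, rfl⟩ := List.mem_map.mp hb
    have : ca = cb := pvSingle_inj hab
    rw [this]
  have hnodup :
      (((PySem.Set.ofList (PySem.List.sorted (PySem.Int.toChars throw) (fun c => c))).map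
        (fun c => (String.ofList [c], ((PySem.Int.toChars throw).count c : Int)))).map
        Prod.fst).Nodup := by
    rw [List.nodup_iff_pairwise_ne, List.pairwise_map]
    exact hkeys.imp (fun h => ne_of_lt h)
  rw [hA, pvSorted2_eq_sorted _ _ _ hdet, hsorted, pvOfList_items _ hnodup, hBs]
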